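-- pv_equiv track=rewrite | github.com/DeSchoel/FateWarScraper | src/fatewarscraper/parse.py | clean_number_string
-- ===== SOURCE A (Python) =====
-- def clean_number_string(text: str) -> str:
--     """Remove common OCR noise and formatting from numbers."""
--     # First apply common character mappings
--     cleaned = text.replace('O', '0').replace('o', '0')
--     cleaned = cleaned.replace('I', '1').replace('l', '1')
--     cleaned = cleaned.replace('S', '5').replace('s', '5')
--     cleaned = cleaned.replace('G', '6')
--     cleaned = cleaned.replace('B', '8')
--     cleaned = cleaned.replace('Q', '0')
--     cleaned = cleaned.replace('C', '0')
--     cleaned = cleaned.replace('(', '0').replace(')', '0')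
--
--     # Strip everything that is not a digit
--     cleaned = "".join(c for c in cleaned if c.isdigit())
--     return cleaned
-- ===== SOURCE B (Python) =====
-- _OCR_MAP = {'O': '0', 'o': '0', 'I': '1', 'l': '1', 'S': '5', 's': '5',
--             'G': '6', 'B': '8', 'Q': '0', 'C': '0', '(': '0', ')': '0'}
--
--
-- def clean_number_string(text: str) -> str:
--     """Remove common OCR noise and formatting from numbers.
--
--     Single pass: substitute each OCR-confusable char via one table,
--     keep only digits.
--     """
--     out = []
--     for ch in text:
--         ch = _OCR_MAP.get(ch, ch)
--         if ch.isdigit():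
--             out.append(ch)
--     return "".join(out)
-- ===== Notes on version B (the rewrite author's own statement) =====
-- stated objective: simpler
-- what changed: Replaces thirteen sequential whole-string .replace() scans followed by a filtering join with ONE pass over the input that maps each character through a single substitution table and keeps it only if it is a digit (valid because no substitution target is itself a source).
import Mathlib
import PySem

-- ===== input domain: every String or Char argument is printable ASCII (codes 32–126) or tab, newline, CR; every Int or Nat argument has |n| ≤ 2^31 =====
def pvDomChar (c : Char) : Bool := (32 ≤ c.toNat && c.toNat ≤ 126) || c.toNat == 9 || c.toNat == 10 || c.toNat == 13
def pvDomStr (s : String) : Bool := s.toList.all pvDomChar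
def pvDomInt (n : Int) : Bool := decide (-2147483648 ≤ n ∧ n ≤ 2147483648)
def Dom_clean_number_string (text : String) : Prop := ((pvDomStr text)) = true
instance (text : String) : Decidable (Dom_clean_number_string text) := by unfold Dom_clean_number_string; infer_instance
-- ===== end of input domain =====

-- B replaces A's chain of thirteen whole-string .replace() scans by a single table-lookup pass (simpler, one traversal).

-- ===== PORT A =====
def clean_number_string (text : String) : String :=
  let c1 := PySem.Str.replace (PySem.Str.replace text "O" "0") "o" "0"
  let c2 := PySem.Str.replace (PySem.Str.replace c1 "I" "1") "l" "1"
  let c3 := PySem.Str.replace (PySem.Str.replace c2 "S" "5") "s" "5"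
  let c4 := PySem.Str.replace c3 "G" "6"
  let c5 := PySem.Str.replace c4 "B" "8"
  let c6 := PySem.Str.replace c5 "Q" "0"
  let c7 := PySem.Str.replace c6 "C" "0"
  let c8 := PySem.Str.replace (PySem.Str.replace c7 "(" "0") ")" "0"
  -- "".join(c for c in cleaned if c.isdigit())
  String.ofList (c8.toList.filter PySem.Chars.isdigit)

-- ===== PORT B =====
def pvOcrMap : PySem.Dict Char Char :=
  PySem.Dict.ofList [('O', '0'), ('o', '0'), ('I', '1'), ('l', '1'), ('S', '5'), ('s', '5'),
                     ('G', '6'), ('B', '8'), ('Q', '0'), ('C', '0'), ('(', '0'), (')', '0')]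

def clean_number_string_alt (text : String) : String :=
  let out := text.toList.foldl (fun acc ch =>
    let ch' := pvOcrMap.getD ch ch
    if PySem.Chars.isdigit ch' then acc ++ [ch'] else acc) []
  String.ofList out

-- ===== PRECONDITION & SPEC =====
def Spec_clean_number_string (text : String) (out : String) : Prop := out = clean_number_string_alt text
instance (text : String) (out : String) : Decidable (Spec_clean_number_string text out) := by unfold Spec_clean_number_string; infer_instance

-- ===== CLAIM (what is proved, stated in full; the proofs are below) =====
def Claim_equal_clean_number_string : Prop := ∀ (text : String), Dom_clean_number_string text → Spec_clean_number_string text (clean_number_string text)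

-- ===== LEMMAS AND PROOFS =====

/-- One single-character substitution, as a per-character function. -/
def pvStep (a b c : Char) : Char := if c = a then b else c

/-- The substitution implemented by A's chain of replaces (innermost applied first). -/
def pvSubstA (c : Char) : Char :=
  pvStep ')' '0' (pvStep '(' '0' (pvStep 'C' '0' (pvStep 'Q' '0' (pvStep 'B' '8'
    (pvStep 'G' '6' (pvStep 's' '5' (pvStep 'S' '5' (pvStep 'l' '1' (pvStep 'I' '1'
      (pvStep 'o' '0' (pvStep 'O' '0' c)))))))))))

lemma replace_go_single (a b : Char) : ∀ (fuel : Nat) (l acc : List Char), l.length ≤ fuel →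
    PySem.Chars.replace.go [a] [b] fuel l acc = acc.reverse ++ l.map (pvStep a b) := by
  intro fuel
  induction fuel with
  | zero =>
    intro l acc h
    have : l = [] := List.length_eq_zero_iff.mp (Nat.le_zero.mp h)
    subst this
    simp [PySem.Chars.replace.go]
  | succ n ih =>
    intro l acc h
    cases l with
    | nil => simp [PySem.Chars.replace.go]
    | cons c t =>
      have hl : t.length ≤ n := by simpa using Nat.le_of_succ_le_succ h
      simp only [PySem.Chars.replace.go]
      by_cases hc : c = a
      · subst hc
        rw [if_pos (by simp [List.isPrefixOf])]
        rw [show List.drop (List.length [c]) (c :: t) = t from rfl]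
        rw [ih t _ hl]
        simp [pvStep]
      · rw [if_neg (by simp [List.isPrefixOf]; exact fun hh => hc hh.symm)]
        rw [ih t _ hl]
        simp [pvStep, hc]

lemma replace_single (cs : List Char) (a b : Char) :
    PySem.Chars.replace cs [a] [b] = cs.map (pvStep a b) := by
  simp only [PySem.Chars.replace, List.isEmpty_cons, Bool.false_eq_true, if_false]
  simpa using replace_go_single a b cs.length cs [] le_rfl

set_option maxHeartbeats 800000 in
/-- A's chained replaces act character-wise as `pvSubstA`. -/
lemma clean_A_eq (text : String) :
    clean_number_string text
      = String.ofList ((text.toList.map pvSubstA).filter PySem.Chars.isdigit) := by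
  simp only [clean_number_string, PySem.Str.replace, String.toList_ofList,
    show ("O":String).toList = ['O'] from rfl, show ("o":String).toList = ['o'] from rfl,
    show ("I":String).toList = ['I'] from rfl, show ("l":String).toList = ['l'] from rfl,
    show ("S":String).toList = ['S'] from rfl, show ("s":String).toList = ['s'] from rfl,
    show ("G":String).toList = ['G'] from rfl, show ("B":String).toList = ['B'] from rfl,
    show ("Q":String).toList = ['Q'] from rfl, show ("C":String).toList = ['C'] from rfl,
    show ("(":String).toList = ['('] from rfl, show (")":String).toList = [')'] from rfl,
    show ("0":String).toList = ['0'] from rfl, show ("1":String).toList = ['1'] from rfl,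
    show ("5":String).toList = ['5'] from rfl, show ("6":String).toList = ['6'] from rfl,
    show ("8":String).toList = ['8'] from rfl,
    replace_single, List.map_map]
  exact congrArg String.ofList (congrArg (List.filter PySem.Chars.isdigit)
    (List.map_congr_left (fun c _ => by simp only [Function.comp, pvSubstA])))

/-- The per-character substitutions of A and B agree. -/
lemma subst_agree (c : Char) : pvSubstA c = pvOcrMap.getD c c := by
  have hmk : pvOcrMap
      = PySem.Dict.mk [('O', '0'), ('o', '0'), ('I', '1'), ('l', '1'), ('S', '5'), ('s', '5'),
         ('G', '6'), ('B', '8'), ('Q', '0'), ('C', '0'), ('(', '0'), (')', '0')] := by decide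
  by_cases h1 : c = 'O'; · subst h1; decide
  by_cases h2 : c = 'o'; · subst h2; decide
  by_cases h3 : c = 'I'; · subst h3; decide
  by_cases h4 : c = 'l'; · subst h4; decide
  by_cases h5 : c = 'S'; · subst h5; decide
  by_cases h6 : c = 's'; · subst h6; decide
  by_cases h7 : c = 'G'; · subst h7; decide
  by_cases h8 : c = 'B'; · subst h8; decide
  by_cases h9 : c = 'Q'; · subst h9; decide
  by_cases h10 : c = 'C'; · subst h10; decide
  by_cases h11 : c = '('; · subst h11; decide
  by_cases h12 : c = ')'; · subst h12; decide
  have hs : pvSubstA c = c := by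
    simp [pvSubstA, pvStep, h1, h2, h3, h4, h5, h6, h7, h8, h9, h10, h11, h12]
  have hd : pvOcrMap.getD c c = c := by
    rw [hmk]
    simp [PySem.Dict.getD, beq_iff_eq,
      Ne.symm h1, Ne.symm h2, Ne.symm h3, Ne.symm h4, Ne.symm h5, Ne.symm h6,
      Ne.symm h7, Ne.symm h8, Ne.symm h9, Ne.symm h10, Ne.symm h11, Ne.symm h12,
      PySem.Dict.get?]
  rw [hs, hd]

/-- B's accumulator fold is the filtered map. -/
lemma fold_B (cs : List Char) : ∀ acc : List Char,
    cs.foldl (fun acc ch =>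
      let ch' := pvOcrMap.getD ch ch
      if PySem.Chars.isdigit ch' then acc ++ [ch'] else acc) acc
      = acc ++ (cs.map (fun ch => pvOcrMap.getD ch ch)).filter PySem.Chars.isdigit := by
  induction cs with
  | nil => intro acc; simp
  | cons c t ih =>
    intro acc
    simp only [List.foldl_cons, List.map_cons, List.filter_cons]
    by_cases h : PySem.Chars.isdigit (pvOcrMap.getD c c)
    · simp only [h, if_true, ih]
      simp
    · simp only [h, Bool.false_eq_true, if_false, ih]

-- ===== VERDICT (by name: the statement is the Claim_ definition above) =====
theorem clean_number_string_spec : Claim_equal_clean_number_string := by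
  intro text _
  unfold Spec_clean_number_string clean_number_string_alt
  rw [clean_A_eq, fold_B text.toList []]
  simp only [List.nil_append]
  exact congrArg String.ofList (congrArg (List.filter PySem.Chars.isdigit)
    (List.map_congr_left (fun c _ => subst_agree c)))
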